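-- pv_equiv track=rewrite | github.com/PeerPortal/web | backend/backend-main/app/crud/crud_matching.py | _are_related_majors
-- ===== SOURCE A (Python) =====
-- def _are_related_majors(major1: str, major2: str) -> bool:
--     """检查两个专业是否相关"""
--     # 预定义的相关专业映射
--     related_majors = {
--         'computer science': ['software engineering', 'information technology', 'data science', 'artificial intelligence'],
--         'business administration': ['management', 'marketing', 'finance', 'economics'],
--         'electrical engineering': ['computer engineering', 'electronics', 'telecommunications'],
--         'mechanical engineering': ['aerospace engineering', 'automotive engineering', 'robotics'],
--         'psychology': ['cognitive science', 'behavioral science', 'neuroscience'],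
--         'biology': ['biotechnology', 'biochemistry', 'bioinformatics', 'molecular biology'],
--         'chemistry': ['chemical engineering', 'materials science', 'pharmaceutical science'],
--         'mathematics': ['statistics', 'actuarial science', 'applied mathematics', 'data science'],
--         'physics': ['astronomy', 'astrophysics', 'engineering physics', 'materials science']
--     }
--
--     major1_lower = major1.lower()
--     major2_lower = major2.lower()
--
--     # 检查直接映射
--     for base_major, related_list in related_majors.items():
--         if ((major1_lower == base_major and major2_lower in related_list) or
--             (major2_lower == base_major and major1_lower in related_list) or
--             (major1_lower in related_list and major2_lower in related_list)):
--             return True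
--
--     return False
-- ===== SOURCE B (Python) =====
-- _RELATED_MAJORS = {
--     'computer science': ['software engineering', 'information technology', 'data science', 'artificial intelligence'],
--     'business administration': ['management', 'marketing', 'finance', 'economics'],
--     'electrical engineering': ['computer engineering', 'electronics', 'telecommunications'],
--     'mechanical engineering': ['aerospace engineering', 'automotive engineering', 'robotics'],
--     'psychology': ['cognitive science', 'behavioral science', 'neuroscience'],
--     'biology': ['biotechnology', 'biochemistry', 'bioinformatics', 'molecular biology'],
--     'chemistry': ['chemical engineering', 'materials science', 'pharmaceutical science'],
--     'mathematics': ['statistics', 'actuarial science', 'applied mathematics', 'data science'],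
--     'physics': ['astronomy', 'astrophysics', 'engineering physics', 'materials science']
-- }
--
-- # Precomputed once: the set of all ordered related pairs (base->member, member->base,
-- # and member->member including self-loops, per group; groups are NOT merged transitively).
-- _RELATED_PAIRS = frozenset(
--     pair
--     for base, related in _RELATED_MAJORS.items()
--     for pair in (
--         [(base, m) for m in related]
--         + [(m, base) for m in related]
--         + [(m1, m2) for m1 in related for m2 in related]
--     )
-- )
--
--
-- def _are_related_majors(major1: str, major2: str) -> bool:
--     """检查两个专业是否相关"""
--     return (major1.lower(), major2.lower()) in _RELATED_PAIRS
-- ===== Notes on version B (the rewrite author's own statement) =====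
-- stated objective: faster
-- what changed: B precomputes once (at module load) the frozenset of all ordered related pairs per group and answers each call with a single set-membership test, instead of A's per-call scan of the dict with compound equality/membership conditions.
import Mathlib
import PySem

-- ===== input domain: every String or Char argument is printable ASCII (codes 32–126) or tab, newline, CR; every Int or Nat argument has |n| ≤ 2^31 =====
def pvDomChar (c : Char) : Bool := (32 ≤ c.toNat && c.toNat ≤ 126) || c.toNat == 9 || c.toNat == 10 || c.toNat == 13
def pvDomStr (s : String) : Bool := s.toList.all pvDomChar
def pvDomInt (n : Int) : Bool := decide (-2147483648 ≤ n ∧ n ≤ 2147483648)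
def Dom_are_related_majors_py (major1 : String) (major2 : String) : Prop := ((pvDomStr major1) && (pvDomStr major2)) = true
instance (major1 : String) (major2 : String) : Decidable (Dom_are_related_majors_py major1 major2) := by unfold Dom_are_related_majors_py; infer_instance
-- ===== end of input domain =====

-- B precomputes the set of all ordered related pairs once and answers with one membership test,
-- instead of A's per-call scan of the group dict with compound equality/membership conditions.

-- ===== PORT A =====
-- the related_majors dict, in insertion order
def pvGroups : List (String × List String) :=
  [ ("computer science", ["software engineering", "information technology", "data science", "artificial intelligence"]),
    ("business administration", ["management", "marketing", "finance", "economics"]),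
    ("electrical engineering", ["computer engineering", "electronics", "telecommunications"]),
    ("mechanical engineering", ["aerospace engineering", "automotive engineering", "robotics"]),
    ("psychology", ["cognitive science", "behavioral science", "neuroscience"]),
    ("biology", ["biotechnology", "biochemistry", "bioinformatics", "molecular biology"]),
    ("chemistry", ["chemical engineering", "materials science", "pharmaceutical science"]),
    ("mathematics", ["statistics", "actuarial science", "applied mathematics", "data science"]),
    ("physics", ["astronomy", "astrophysics", "engineering physics", "materials science"]) ]

-- the 'for base_major, related_list in related_majors.items(): if …: return True' loop
def pvLoopA (x y : String) : List (String × List String) → Bool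
  | [] => false
  | (b, L) :: t =>
    if ((x == b && L.contains y) || (y == b && L.contains x) || (L.contains x && L.contains y)) then
      true
    else
      pvLoopA x y t

def are_related_majors_py (major1 : String) (major2 : String) : Bool :=
  pvLoopA (PySem.Str.lower major1) (PySem.Str.lower major2) pvGroups

-- ===== PORT B =====
-- all ordered related pairs contributed by one group (base→member, member→base, member→member)
def pvEdgesOf (g : String × List String) : List (String × String) :=
  g.2.map (fun m => (g.1, m)) ++ g.2.map (fun m => (m, g.1)) ++
    g.2.flatMap (fun m1 => g.2.map (fun m2 => (m1, m2)))

-- the module-level frozenset of pairs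
def pvRelatedPairs : PySem.Set (String × String) :=
  PySem.Set.ofList (pvGroups.flatMap pvEdgesOf)

def are_related_majors_py_alt (major1 : String) (major2 : String) : Bool :=
  pvRelatedPairs.contains (PySem.Str.lower major1, PySem.Str.lower major2)

-- ===== PRECONDITION & SPEC =====
def Spec_are_related_majors_py (major1 : String) (major2 : String) (out : Bool) : Prop := out = are_related_majors_py_alt major1 major2
instance (major1 : String) (major2 : String) (out : Bool) : Decidable (Spec_are_related_majors_py major1 major2 out) := by unfold Spec_are_related_majors_py; infer_instance

-- ===== CLAIM (what is proved, stated in full; the proofs are below) =====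
def Claim_equal_are_related_majors_py : Prop := ∀ (major1 : String) (major2 : String), Dom_are_related_majors_py major1 major2 → Spec_are_related_majors_py major1 major2 (are_related_majors_py major1 major2)

-- ===== LEMMAS AND PROOFS =====

-- one group's compound condition is exactly membership of the pair in that group's edge list
theorem pv_mem_edgesOf (b : String) (L : List String) (x y : String) :
    ((x, y) ∈ pvEdgesOf (b, L)) ↔
      ((x = b ∧ y ∈ L) ∨ (y = b ∧ x ∈ L) ∨ (x ∈ L ∧ y ∈ L)) := by
  simp only [pvEdgesOf, List.mem_append, List.mem_map, List.mem_flatMap, Prod.mk.injEq]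
  constructor
  · rintro ((⟨m, hm, hb, hy⟩ | ⟨m, hm, hx, hb⟩) | ⟨m1, hm1, m2, hm2, hx, hy⟩)
    · exact Or.inl ⟨hb.symm, hy ▸ hm⟩
    · exact Or.inr (Or.inl ⟨hb.symm, hx ▸ hm⟩)
    · exact Or.inr (Or.inr ⟨hx ▸ hm1, hy ▸ hm2⟩)
  · rintro (⟨h1, h2⟩ | ⟨h1, h2⟩ | ⟨h1, h2⟩)
    · exact Or.inl (Or.inl ⟨y, h2, h1.symm, rfl⟩)
    · exact Or.inl (Or.inr ⟨x, h2, rfl, h1.symm⟩)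
    · exact Or.inr ⟨x, h1, y, h2, rfl, rfl⟩

-- A's loop over any group list equals membership in the concatenated edge lists
theorem pv_loopA_eq (x y : String) (gs : List (String × List String)) :
    pvLoopA x y gs = (gs.flatMap pvEdgesOf).contains (x, y) := by
  induction gs with
  | nil => simp [pvLoopA]
  | cons g t ih =>
    obtain ⟨b, L⟩ := g
    have hcond : ((x == b && L.contains y) || (y == b && L.contains x)
        || (L.contains x && L.contains y)) = true ↔ (x, y) ∈ pvEdgesOf (b, L) := by
      rw [pv_mem_edgesOf]
      simp only [Bool.or_eq_true, Bool.and_eq_true, beq_iff_eq, List.contains_iff_mem]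
      tauto
    by_cases h : ((x == b && L.contains y) || (y == b && L.contains x)
        || (L.contains x && L.contains y)) = true
    · have hp := (pv_mem_edgesOf b L x y).mp (hcond.mp h)
      simp only [pvLoopA, if_pos h]
      symm
      simp [List.flatMap_cons]
      tauto
    · have hnmem : (x, y) ∉ pvEdgesOf (b, L) := fun hc => h (hcond.mpr hc)
      simp only [pvLoopA, if_neg h, ih, List.flatMap_cons]
      simp [hnmem]

-- ===== VERDICT (by name: the statement is the Claim_ definition above) =====
theorem are_related_majors_py_spec : Claim_equal_are_related_majors_py := by
  intro major1 major2 _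
  unfold Spec_are_related_majors_py are_related_majors_py are_related_majors_py_alt pvRelatedPairs
  rw [pv_loopA_eq]
  simp [PySem.Set.mem_ofList]
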